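-- pv_equiv track=rewrite | github.com/StandardRL-Components/GamesSample | games_0_set_2/game_01741.py | _get_line_path
-- ===== SOURCE A (Python) =====
-- def _get_line_path(start, end):
--     # Bresenham's line algorithm for grid paths
--     x0, y0 = start
--     x1, y1 = end
--     dx, dy = abs(x1 - x0), abs(y1 - y0)
--
--     is_straight_line = (x0 == x1) or (y0 == y1) or (dx == dy)
--     if not is_straight_line:
--         return []
--
--     path = []
--     sx = 1 if x0 < x1 else -1
--     sy = 1 if y0 < y1 else -1
--     err = dx - dy
--
--     while True:
--         path.append((x0, y0))
--         if x0 == x1 and y0 == y1: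
--             break
--         e2 = 2 * err
--         if e2 > -dy:
--             err -= dy
--             x0 += sx
--         if e2 < dx:
--             err += dx
--             y0 += sy
--     return path
-- ===== SOURCE B (Python) =====
-- def _get_line_path(start, end):
--     # Direct index arithmetic: n+1 points stepping by the per-axis sign.
--     x0, y0 = start
--     x1, y1 = end
--     dx, dy = x1 - x0, y1 - y0
--     if not (dx == 0 or dy == 0 or abs(dx) == abs(dy)):
--         return []
--     n = max(abs(dx), abs(dy))
--     sx = (dx > 0) - (dx < 0)
--     sy = (dy > 0) - (dy < 0)
--     return [(x0 + i * sx, y0 + i * sy) for i in range(n + 1)]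
-- ===== Notes on version B (the rewrite author's own statement) =====
-- stated objective: simpler
-- what changed: Replaced the error-term Bresenham while-loop with a closed-form comprehension: n = max(|dx|,|dy|) and per-axis sign steps, emitting point i as (x0+i*sx, y0+i*sy).
import Mathlib
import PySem

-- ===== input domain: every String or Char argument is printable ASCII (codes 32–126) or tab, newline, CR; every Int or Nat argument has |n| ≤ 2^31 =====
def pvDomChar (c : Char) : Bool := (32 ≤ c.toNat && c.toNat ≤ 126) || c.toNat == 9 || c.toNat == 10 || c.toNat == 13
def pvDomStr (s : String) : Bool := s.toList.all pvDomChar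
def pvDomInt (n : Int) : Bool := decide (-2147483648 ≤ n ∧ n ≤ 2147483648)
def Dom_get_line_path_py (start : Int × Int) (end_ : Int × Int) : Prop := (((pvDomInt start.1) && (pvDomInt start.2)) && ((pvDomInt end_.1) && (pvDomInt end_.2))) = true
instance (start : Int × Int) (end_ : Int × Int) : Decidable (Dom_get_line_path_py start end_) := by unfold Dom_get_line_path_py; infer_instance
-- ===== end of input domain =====

-- B replaces A's error-term Bresenham while-loop with a closed-form comprehension
-- over per-axis sign steps (objective: simpler); same return value on all inputs.

-- ===== PORT A =====
-- the while-True loop of A; fuel = dx + dy + 1 steps always suffice (guard only, never reached)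
def bresLoop : Nat → Int → Int → Int → Int → Int → Int → Int → Int → Int → List (Int × Int)
  | 0, _, _, _, _, _, _, _, _, _ => []
  | fuel + 1, x0, y0, x1, y1, sx, sy, dx, dy, err =>
    if x0 = x1 ∧ y0 = y1 then [(x0, y0)]
    else
      let e2 := 2 * err
      let err1 := if e2 > -dy then err - dy else err
      let x0' := if e2 > -dy then x0 + sx else x0
      let err2 := if e2 < dx then err1 + dx else err1
      let y0' := if e2 < dx then y0 + sy else y0
      (x0, y0) :: bresLoop fuel x0' y0' x1 y1 sx sy dx dy err2

def get_line_path_py (start : Int × Int) (end_ : Int × Int) : List (Int × Int) :=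
  if ¬(start.1 = end_.1 ∨ start.2 = end_.2 ∨ |end_.1 - start.1| = |end_.2 - start.2|) then []
  else
    bresLoop ((|end_.1 - start.1| + |end_.2 - start.2|).toNat + 1)
      start.1 start.2 end_.1 end_.2
      (if start.1 < end_.1 then 1 else -1)
      (if start.2 < end_.2 then 1 else -1)
      (|end_.1 - start.1|) (|end_.2 - start.2|)
      (|end_.1 - start.1| - |end_.2 - start.2|)

-- ===== PORT B =====
def get_line_path_py_alt (start : Int × Int) (end_ : Int × Int) : List (Int × Int) :=
  if ¬(end_.1 - start.1 = 0 ∨ end_.2 - start.2 = 0 ∨ |end_.1 - start.1| = |end_.2 - start.2|) then []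
  else
    (PySem.List.pyRange 0 (max |end_.1 - start.1| |end_.2 - start.2| + 1) 1).map
      (fun i => (start.1 + i * ((if 0 < end_.1 - start.1 then (1 : Int) else 0) - (if end_.1 - start.1 < 0 then 1 else 0)),
                 start.2 + i * ((if 0 < end_.2 - start.2 then (1 : Int) else 0) - (if end_.2 - start.2 < 0 then 1 else 0))))

-- ===== PRECONDITION & SPEC =====
def Spec_get_line_path_py (start : Int × Int) (end_ : Int × Int) (out : List (Int × Int)) : Prop := out = get_line_path_py_alt start end_
instance (start : Int × Int) (end_ : Int × Int) (out : List (Int × Int)) : Decidable (Spec_get_line_path_py start end_ out) := by unfold Spec_get_line_path_py; infer_instance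

-- ===== CLAIM (what is proved, stated in full; the proofs are below) =====
def Claim_equal_get_line_path_py : Prop := ∀ (start : Int × Int) (end_ : Int × Int), Dom_get_line_path_py start end_ → Spec_get_line_path_py start end_ (get_line_path_py start end_)

-- ===== LEMMAS AND PROOFS =====

-- the point list both programs produce: n+1 points stepping by (sx, sy)
def pts (x0 y0 sx sy : Int) (n : Nat) : List (Int × Int) :=
  (List.range (n + 1)).map (fun (i : Nat) => (x0 + (i : Int) * sx, y0 + (i : Int) * sy))

lemma pts_zero (x0 y0 sx sy : Int) : pts x0 y0 sx sy 0 = [(x0, y0)] := by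
  simp [pts]

lemma pts_succ (x0 y0 sx sy : Int) (n : Nat) :
    pts x0 y0 sx sy (n + 1) = (x0, y0) :: pts (x0 + sx) (y0 + sy) sx sy n := by
  unfold pts
  rw [List.range_succ_eq_map, List.map_cons, List.map_map]
  refine congrArg₂ _ (by norm_num) (List.map_congr_left ?_)
  intro i _
  simp only [Function.comp, Nat.succ_eq_add_one, Prod.mk.injEq]
  constructor <;> push_cast <;> ring

lemma loop_horiz (sx dx : Int) (hdx : 0 < dx) (hsx : sx = 1 ∨ sx = -1) :
    ∀ (n fuel : Nat), n < fuel → ∀ (x0 y0 sy : Int),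
      bresLoop fuel x0 y0 (x0 + (n : Int) * sx) y0 sx sy dx 0 dx = pts x0 y0 sx 0 n := by
  intro n
  induction n with
  | zero =>
    intro fuel hf x0 y0 sy
    obtain ⟨f, rfl⟩ : ∃ f, fuel = f + 1 := ⟨fuel - 1, by omega⟩
    simp [bresLoop, pts_zero]
  | succ n ih =>
    intro fuel hf x0 y0 sy
    obtain ⟨f, rfl⟩ : ∃ f, fuel = f + 1 := ⟨fuel - 1, by omega⟩
    have hne : ¬(x0 = x0 + ((n + 1 : Nat) : Int) * sx ∧ True) := by
      push_cast
      rcases hsx with h | h <;> rw [h] <;> intro ⟨h1, _⟩ <;> omega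
    have hstep : ((n + 1 : Nat) : Int) * sx = sx + (n : Int) * sx := by push_cast; ring
    simp only [bresLoop]
    rw [if_neg hne]
    simp only [neg_zero, gt_iff_lt]
    rw [if_pos (by omega : (0:Int) < 2 * dx), if_pos (by omega : (0:Int) < 2 * dx),
        if_neg (by omega : ¬(2 * dx < dx)), if_neg (by omega : ¬(2 * dx < dx))]
    rw [show x0 + ((n + 1 : Nat) : Int) * sx = (x0 + sx) + (n : Int) * sx by rw [hstep]; ring,
        sub_zero, ih f (by omega), pts_succ]
    simp

lemma loop_vert (sy dy : Int) (hdy : 0 < dy) (hsy : sy = 1 ∨ sy = -1) :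
    ∀ (n fuel : Nat), n < fuel → ∀ (x0 y0 sx : Int),
      bresLoop fuel x0 y0 x0 (y0 + (n : Int) * sy) sx sy 0 dy (-dy) = pts x0 y0 0 sy n := by
  intro n
  induction n with
  | zero =>
    intro fuel hf x0 y0 sx
    obtain ⟨f, rfl⟩ : ∃ f, fuel = f + 1 := ⟨fuel - 1, by omega⟩
    simp [bresLoop, pts_zero]
  | succ n ih =>
    intro fuel hf x0 y0 sx
    obtain ⟨f, rfl⟩ : ∃ f, fuel = f + 1 := ⟨fuel - 1, by omega⟩
    have hne : ¬(True ∧ y0 = y0 + ((n + 1 : Nat) : Int) * sy) := by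
      push_cast
      rcases hsy with h | h <;> rw [h] <;> intro ⟨_, h2⟩ <;> omega
    simp only [bresLoop]
    rw [if_neg hne]
    simp only [gt_iff_lt]
    rw [if_neg (by omega : ¬(-dy < 2 * -dy)), if_neg (by omega : ¬(-dy < 2 * -dy)),
        if_pos (by omega : 2 * -dy < (0:Int)), if_pos (by omega : 2 * -dy < (0:Int))]
    rw [show y0 + ((n + 1 : Nat) : Int) * sy = (y0 + sy) + (n : Int) * sy by push_cast; ring,
        add_zero, ih f (by omega), pts_succ]
    simp

lemma loop_diag (sx sy d : Int) (hd : 0 < d) (hsx : sx = 1 ∨ sx = -1) :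
    ∀ (n fuel : Nat), n < fuel → ∀ (x0 y0 : Int),
      bresLoop fuel x0 y0 (x0 + (n : Int) * sx) (y0 + (n : Int) * sy) sx sy d d 0 = pts x0 y0 sx sy n := by
  intro n
  induction n with
  | zero =>
    intro fuel hf x0 y0
    obtain ⟨f, rfl⟩ : ∃ f, fuel = f + 1 := ⟨fuel - 1, by omega⟩
    simp [bresLoop, pts_zero]
  | succ n ih =>
    intro fuel hf x0 y0
    obtain ⟨f, rfl⟩ : ∃ f, fuel = f + 1 := ⟨fuel - 1, by omega⟩
    have hne : ¬(x0 = x0 + ((n + 1 : Nat) : Int) * sx ∧ y0 = y0 + ((n + 1 : Nat) : Int) * sy) := by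
      push_cast
      rcases hsx with h | h <;> rw [h] <;> intro ⟨h1, _⟩ <;> omega
    simp only [bresLoop]
    rw [if_neg hne]
    simp only [gt_iff_lt, mul_zero]
    rw [if_pos (by omega : -d < (0:Int)), if_pos (by omega : -d < (0:Int)),
        if_pos (by omega : (0:Int) < d), if_pos (by omega : (0:Int) < d)]
    have h0 : (0:Int) - d + d = 0 := by ring
    rw [show x0 + ((n + 1 : Nat) : Int) * sx = (x0 + sx) + (n : Int) * sx by push_cast; ring,
        show y0 + ((n + 1 : Nat) : Int) * sy = (y0 + sy) + (n : Int) * sy by push_cast; ring,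
        h0, ih f (by omega), pts_succ]

lemma alt_eq_pts (m : Int) (hm : 0 ≤ m) (sx sy x0 y0 : Int) :
    (PySem.List.pyRange 0 (m + 1) 1).map (fun i => (x0 + i * sx, y0 + i * sy)) =
      pts x0 y0 sx sy m.toNat := by
  rw [PySem.List.pyRange_one, List.map_map]
  unfold pts
  have : ((m + 1) - 0).toNat = m.toNat + 1 := by omega
  rw [this]
  refine List.map_congr_left ?_
  intro i _
  simp [Function.comp]

-- signs: B's (dx>0)-(dx<0) agrees with A's (if a < b then 1 else -1) when a ≠ b
lemma sign_eq (a b : Int) (h : a ≠ b) :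
    ((if 0 < b - a then (1 : Int) else 0) - (if b - a < 0 then 1 else 0)) =
      (if a < b then (1 : Int) else -1) := by
  by_cases hab : a < b
  · rw [if_pos (by omega), if_neg (by omega), if_pos hab]; norm_num
  · rw [if_neg (by omega), if_pos (by omega), if_neg hab]; norm_num

lemma sign_cases (a b : Int) :
    (if a < b then (1 : Int) else -1) = 1 ∨ (if a < b then (1 : Int) else -1) = -1 := by
  by_cases hab : a < b <;> simp [hab]

lemma reach (a b : Int) :
    b = a + (((b - a).natAbs : Nat) : Int) * (if a < b then (1 : Int) else -1) := by
  by_cases hab : a < b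
  · rw [if_pos hab, mul_one]; omega
  · rw [if_neg hab, mul_neg_one]; omega

-- ===== VERDICT (by name: the statement is the Claim_ definition above) =====
theorem get_line_path_py_spec : Claim_equal_get_line_path_py := by
  intro start end_ _
  obtain ⟨x0, y0⟩ := start
  obtain ⟨x1, y1⟩ := end_
  unfold Spec_get_line_path_py get_line_path_py get_line_path_py_alt
  simp only [Int.abs_eq_natAbs]
  by_cases hstraight : x0 = x1 ∨ y0 = y1 ∨ (x1 - x0).natAbs = (y1 - y0).natAbs
  case neg =>
    rw [if_pos (show ¬(x0 = x1 ∨ y0 = y1 ∨ ((x1 - x0).natAbs : Int) = ((y1 - y0).natAbs : Int)) from by omega),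
        if_pos (show ¬(x1 - x0 = 0 ∨ y1 - y0 = 0 ∨ ((x1 - x0).natAbs : Int) = ((y1 - y0).natAbs : Int)) from by omega)]
  case pos =>
  rw [if_neg (show ¬¬(x0 = x1 ∨ y0 = y1 ∨ ((x1 - x0).natAbs : Int) = ((y1 - y0).natAbs : Int)) from by omega),
      if_neg (show ¬¬(x1 - x0 = 0 ∨ y1 - y0 = 0 ∨ ((x1 - x0).natAbs : Int) = ((y1 - y0).natAbs : Int)) from by omega)]
  by_cases hx : x0 = x1
  · subst hx
    by_cases hy : y0 = y1
    · subst hy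
      norm_num [bresLoop, PySem.List.pyRange_one]
    · -- vertical line
      set n : Nat := (y1 - y0).natAbs with hn
      set sy : Int := if y0 < y1 then (1 : Int) else -1 with hsy
      rw [show ((x0 - x0).natAbs : Int) = 0 by omega]
      rw [show ((0 : Int) + (n : Int)).toNat + 1 = n + 1 by omega]
      rw [show (0 : Int) - (n : Int) = -(n : Int) by ring]
      rw [show ((if 0 < x0 - x0 then (1 : Int) else 0) - (if x0 - x0 < 0 then 1 else 0)) = 0 by norm_num]
      rw [show ((if 0 < y1 - y0 then (1 : Int) else 0) - (if y1 - y0 < 0 then 1 else 0)) = sy by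
        rw [hsy]; exact sign_eq y0 y1 hy]
      rw [show max (0 : Int) ((n : Nat) : Int) = ((n : Nat) : Int) by omega]
      rw [alt_eq_pts ((n : Nat) : Int) (by omega) 0 sy x0 y0]
      rw [show (((n : Nat) : Int)).toNat = n by omega]
      conv_lhs => rw [show y1 = y0 + ((n : Nat) : Int) * sy by rw [hsy, hn]; exact reach y0 y1]
      exact loop_vert sy ((n : Nat) : Int) (by omega) (by rw [hsy]; exact sign_cases y0 y1) n (n + 1)
        (by omega) x0 y0 _
  · by_cases hy : y0 = y1
    · subst hy
      -- horizontal line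
      set n : Nat := (x1 - x0).natAbs with hn
      set sx : Int := if x0 < x1 then (1 : Int) else -1 with hsx
      rw [show ((y0 - y0).natAbs : Int) = 0 by omega]
      rw [show ((n : Int) + (0 : Int)).toNat + 1 = n + 1 by omega]
      rw [show ((n : Nat) : Int) - (0 : Int) = ((n : Nat) : Int) by ring]
      rw [show ((if 0 < y0 - y0 then (1 : Int) else 0) - (if y0 - y0 < 0 then 1 else 0)) = 0 by norm_num]
      rw [show ((if 0 < x1 - x0 then (1 : Int) else 0) - (if x1 - x0 < 0 then 1 else 0)) = sx by
        rw [hsx]; exact sign_eq x0 x1 hx]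
      rw [show max ((n : Nat) : Int) (0 : Int) = ((n : Nat) : Int) by omega]
      rw [alt_eq_pts ((n : Nat) : Int) (by omega) sx 0 x0 y0]
      rw [show (((n : Nat) : Int)).toNat = n by omega]
      conv_lhs => rw [show x1 = x0 + ((n : Nat) : Int) * sx by rw [hsx, hn]; exact reach x0 x1]
      exact loop_horiz sx ((n : Nat) : Int) (by omega) (by rw [hsx]; exact sign_cases x0 x1) n (n + 1)
        (by omega) x0 y0 _
    · -- diagonal line
      have hd : (x1 - x0).natAbs = (y1 - y0).natAbs := by tauto
      set n : Nat := (x1 - x0).natAbs with hn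
      set sx : Int := if x0 < x1 then (1 : Int) else -1 with hsx
      set sy : Int := if y0 < y1 then (1 : Int) else -1 with hsy
      rw [show ((y1 - y0).natAbs : Int) = ((n : Nat) : Int) by omega]
      rw [show (((n : Nat) : Int) + ((n : Nat) : Int)).toNat + 1 = n + n + 1 by omega]
      rw [show ((n : Nat) : Int) - ((n : Nat) : Int) = 0 by ring]
      rw [show ((if 0 < x1 - x0 then (1 : Int) else 0) - (if x1 - x0 < 0 then 1 else 0)) = sx by
        rw [hsx]; exact sign_eq x0 x1 hx]
      rw [show ((if 0 < y1 - y0 then (1 : Int) else 0) - (if y1 - y0 < 0 then 1 else 0)) = sy by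
        rw [hsy]; exact sign_eq y0 y1 hy]
      rw [show max ((n : Nat) : Int) ((n : Nat) : Int) = ((n : Nat) : Int) by omega]
      rw [alt_eq_pts ((n : Nat) : Int) (by omega) sx sy x0 y0]
      rw [show (((n : Nat) : Int)).toNat = n by omega]
      conv_lhs => rw [show x1 = x0 + ((n : Nat) : Int) * sx by rw [hsx, hn]; exact reach x0 x1]
      conv_lhs => rw [show y1 = y0 + ((n : Nat) : Int) * sy by
        rw [hsy, hn, show (x1 - x0).natAbs = (y1 - y0).natAbs from by omega]; exact reach y0 y1]
      exact loop_diag sx sy ((n : Nat) : Int) (by omega) (by rw [hsx]; exact sign_cases x0 x1) n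
        (n + n + 1) (by omega) x0 y0
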